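-- pv_equiv track=rewrite | github.com/karineek/AccelerQ | src/kcl_opt_xgb.py | min_corpus
-- ===== SOURCE A (Python) =====
-- import copy
--
-- def min_corpus(corpus1, corpus1_score):
--     if (len(corpus1) < 100):
--         return corpus1, corpus1_score
--
--     # reduce by 50%
--     corpus2 = []
--     corpus2_score = []
--
--     # Select negative only and 10% top
--     sorted_scores = sorted(copy.deepcopy(corpus1_score))  # Deepcopy and sort
--     cut_off_score = min(0,sorted_scores[int(len(corpus1_score)/2)])
--
--     for score, corpus_entry in zip(corpus1_score, corpus1):
--         if score <= cut_off_score: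
--             corpus2.append(corpus_entry)
--             corpus2_score.append(score)
--
--     return corpus2, corpus2_score
-- ===== SOURCE B (Python) =====
-- def min_corpus(corpus1, corpus1_score):
--     if len(corpus1) < 100:
--         return corpus1, corpus1_score
--
--     # k-th smallest score by iterative quickselect (middle-element pivot),
--     # O(n) expected instead of a full O(n log n) sort.
--     xs = corpus1_score
--     k = len(corpus1_score) // 2
--     while True:
--         pivot = xs[len(xs) // 2]
--         lt = [x for x in xs if x < pivot]
--         if k < len(lt):
--             xs = lt
--             continue
--         eq = xs.count(pivot)
--         if k < len(lt) + eq: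
--             median = pivot
--             break
--         k -= len(lt) + eq
--         xs = [x for x in xs if x > pivot]
--
--     cut_off_score = min(0, median)
--     pairs = [sc for sc in zip(corpus1_score, corpus1) if sc[0] <= cut_off_score]
--     return [e for _, e in pairs], [s for s, _ in pairs]
-- ===== Notes on version B (the rewrite author's own statement) =====
-- stated objective: alternative
-- what changed: B finds the median cutoff with an iterative quickselect (expected O(n)) instead of fully sorting the score list, and builds the filtered outputs with comprehensions over the zip instead of an append loop.
import Mathlib
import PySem

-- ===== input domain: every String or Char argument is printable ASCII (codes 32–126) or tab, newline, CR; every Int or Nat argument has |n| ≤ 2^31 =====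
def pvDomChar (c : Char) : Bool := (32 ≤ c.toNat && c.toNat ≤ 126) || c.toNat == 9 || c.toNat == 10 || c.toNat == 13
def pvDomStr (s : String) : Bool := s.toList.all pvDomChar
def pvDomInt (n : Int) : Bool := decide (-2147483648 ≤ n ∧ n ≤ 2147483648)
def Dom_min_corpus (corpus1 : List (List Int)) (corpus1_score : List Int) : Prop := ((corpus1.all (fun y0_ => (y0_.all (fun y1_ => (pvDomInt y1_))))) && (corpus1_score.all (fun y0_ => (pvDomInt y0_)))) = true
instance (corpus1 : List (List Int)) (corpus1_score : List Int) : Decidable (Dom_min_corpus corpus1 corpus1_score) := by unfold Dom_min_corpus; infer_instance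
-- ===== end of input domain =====

-- B replaces A's full sort of the score list by an iterative quickselect of the median
-- (middle-element pivot) and builds the filtered pair of lists by comprehensions over the zip.


-- ===== PORT A =====
def min_corpus (corpus1 : List (List Int)) (corpus1_score : List Int) : List (List Int) × List Int :=
  if corpus1.length < 100 then (corpus1, corpus1_score)
  else
    -- sorted_scores = sorted(copy.deepcopy(corpus1_score))
    let sorted_scores := PySem.List.sorted corpus1_score (fun x => x) false
    -- sorted_scores[int(len(corpus1_score)/2)]  (IndexError on the empty list → excluded by Pre_)
    match PySem.List.pyGet? sorted_scores ((corpus1_score.length / 2 : Nat) : Int) with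
    | none => ([], [])   -- unreachable under Pre_min_corpus (Python raises IndexError here)
    | some m =>
      let cut_off_score := min 0 m
      -- the append loop over zip(corpus1_score, corpus1)
      (corpus1_score.zip corpus1).foldl
        (fun (acc : List (List Int) × List Int) sc =>
          if sc.1 ≤ cut_off_score then (acc.1 ++ [sc.2], acc.2 ++ [sc.1]) else acc)
        ([], [])

-- ===== PORT B =====
-- termination helpers for the quickselect recursion (cited by the port's decreasing_by)
theorem pvPivotMem (xs : List Int) (h : ¬ xs = []) : xs.getD (xs.length / 2) 0 ∈ xs := by
  have hpos : 0 < xs.length := List.length_pos_iff.mpr h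
  have hlt : xs.length / 2 < xs.length := Nat.div_lt_self hpos one_lt_two
  rw [List.getD_eq_getElem xs 0 hlt]
  exact List.getElem_mem _

theorem pvFilterLt (xs : List Int) (h : ¬ xs = []) (q : Int → Bool)
    (hq : q (xs.getD (xs.length / 2) 0) = false) : (xs.filter q).length < xs.length :=
  List.length_filter_lt_length_iff_exists.mpr
    ⟨_, pvPivotMem xs h, by simp only [hq, Bool.false_eq_true, not_false_iff]⟩

-- the elements below / above the pivot ([x for x in xs if x < pivot] / ... if x > pivot])
def pvLt (xs : List Int) (p : Int) : List Int := xs.filter (fun x => decide (x < p))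
def pvGt (xs : List Int) (p : Int) : List Int := xs.filter (fun x => decide (p < x))

-- the quickselect loop of Source B (middle-element pivot); the 'xs = []' branch only makes
-- the recursion total (Python raises IndexError there, excluded by Pre_min_corpus)
def kthSmallest (xs : List Int) (k : Nat) : Int :=
  if hxs : xs = [] then 0
  else if k < (pvLt xs (xs.getD (xs.length / 2) 0)).length then
    kthSmallest (pvLt xs (xs.getD (xs.length / 2) 0)) k
  else if k < (pvLt xs (xs.getD (xs.length / 2) 0)).length
      + xs.count (xs.getD (xs.length / 2) 0) then
    xs.getD (xs.length / 2) 0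
  else
    kthSmallest (pvGt xs (xs.getD (xs.length / 2) 0))
      (k - ((pvLt xs (xs.getD (xs.length / 2) 0)).length
        + xs.count (xs.getD (xs.length / 2) 0)))
termination_by xs.length
decreasing_by
  · simp only [pvLt]
    exact pvFilterLt xs hxs _ (by simp)
  · simp only [pvGt]
    exact pvFilterLt xs hxs _ (by simp)

def min_corpus_alt (corpus1 : List (List Int)) (corpus1_score : List Int) : List (List Int) × List Int :=
  if corpus1.length < 100 then (corpus1, corpus1_score)
  else
    let median := kthSmallest corpus1_score (corpus1_score.length / 2)
    let cut_off_score := min 0 median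
    let pairs := (corpus1_score.zip corpus1).filter (fun sc => decide (sc.1 ≤ cut_off_score))
    (pairs.map Prod.snd, pairs.map Prod.fst)

-- ===== PRECONDITION & SPEC =====
-- Pre_ excludes only the inputs where Python A raises IndexError:
-- len(corpus1) >= 100 together with an empty corpus1_score.
def Pre_min_corpus (corpus1 : List (List Int)) (corpus1_score : List Int) : Prop :=
  corpus1.length < 100 ∨ corpus1_score ≠ []
instance (corpus1 : List (List Int)) (corpus1_score : List Int) : Decidable (Pre_min_corpus corpus1 corpus1_score) := by unfold Pre_min_corpus; infer_instance

def pvWitness_min_corpus : List (List Int) × List Int := ([[1], [2]], [3, -1])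

def Spec_min_corpus (corpus1 : List (List Int)) (corpus1_score : List Int) (out : List (List Int) × List Int) : Prop := out = min_corpus_alt corpus1 corpus1_score
instance (corpus1 : List (List Int)) (corpus1_score : List Int) (out : List (List Int) × List Int) : Decidable (Spec_min_corpus corpus1 corpus1_score out) := by unfold Spec_min_corpus; infer_instance

-- ===== CLAIM (what is proved, stated in full; the proofs are below) =====
def Claim_equal_min_corpus : Prop := ∀ (corpus1 : List (List Int)) (corpus1_score : List Int), Dom_min_corpus corpus1 corpus1_score → Pre_min_corpus corpus1 corpus1_score → Spec_min_corpus corpus1 corpus1_score (min_corpus corpus1 corpus1_score)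

-- ===== LEMMAS AND PROOFS =====

-- the three-way partition at a pivot is a permutation of the list
theorem perm3 (xs : List Int) (p : Int) :
    (xs.filter (fun x => decide (x < p)) ++
      (xs.filter (fun x => x == p) ++ xs.filter (fun x => decide (p < x)))).Perm xs := by
  have hE : xs.filter (fun x => x == p)
      = (xs.filter (fun x => !decide (x < p))).filter (fun x => x == p) := by
    rw [List.filter_filter]
    apply List.filter_congr
    intro x _
    by_cases hx : x = p <;> simp [hx]
  have hG : xs.filter (fun x => decide (p < x))
      = (xs.filter (fun x => !decide (x < p))).filter (fun x => !(x == p)) := by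
    rw [List.filter_filter]
    apply List.filter_congr
    intro x _
    rcases lt_trichotomy x p with h | h | h <;> simp [h] <;> omega
  refine List.Perm.trans (List.Perm.append_left _ ?_) (List.filter_append_perm _ xs)
  rw [hE, hG]
  exact List.filter_append_perm _ _

-- sorted(xs) splits at any pivot into sorted(lt) ++ pivot-block ++ sorted(gt)
theorem sorted_decomp (xs : List Int) (p : Int) :
    PySem.List.sorted xs (fun x => x) false
      = PySem.List.sorted (xs.filter (fun x => decide (x < p))) (fun x => x) false
        ++ (List.replicate (xs.count p) p
          ++ PySem.List.sorted (xs.filter (fun x => decide (p < x))) (fun x => x) false) := by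
  apply PySem.List.sorted_id_eq_of_perm_of_pairwise
  · refine List.Perm.trans ?_ (perm3 xs p)
    refine List.Perm.append (PySem.List.sorted_perm _ _ _)
      (List.Perm.append ?_ (PySem.List.sorted_perm _ _ _))
    rw [← List.filter_beq]
  · rw [List.pairwise_append, List.pairwise_append]
    have hmemL : ∀ x ∈ PySem.List.sorted (xs.filter (fun x => decide (x < p))) (fun x => x) false, x < p := by
      intro x hx
      have := (PySem.List.mem_sorted _ _ _ _).mp hx
      simpa using (List.mem_filter.mp this).2
    have hmemG : ∀ x ∈ PySem.List.sorted (xs.filter (fun x => decide (p < x))) (fun x => x) false, p < x := by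
      intro x hx
      have := (PySem.List.mem_sorted _ _ _ _).mp hx
      simpa using (List.mem_filter.mp this).2
    refine ⟨by simpa using PySem.List.sorted_pairwise _ _,
      ⟨⟨List.pairwise_replicate.mpr (by simp), by simpa using PySem.List.sorted_pairwise _ _, ?_⟩, ?_⟩⟩
    · intro x hx y hy
      have hxp := List.eq_of_mem_replicate hx
      subst hxp
      exact le_of_lt (hmemG y hy)
    · intro x hx y hy
      have hxlt := hmemL x hx
      rcases List.mem_append.mp hy with h | h
      · have := List.eq_of_mem_replicate h
        subst this
        exact le_of_lt hxlt
      · exact le_of_lt (lt_trans hxlt (hmemG y h))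

-- quickselect returns the k-th element of the sorted list
theorem kth_correct (xs : List Int) (k : Nat) (hk : k < xs.length) :
    kthSmallest xs k = (PySem.List.sorted xs (fun x => x) false).getD k 0 := by
  have hxs : ¬ xs = [] := by intro h; subst h; simp at hk
  rw [kthSmallest]
  rw [dif_neg hxs]
  simp only [pvLt, pvGt]
  set pivot := xs.getD (xs.length / 2) 0 with hpiv
  have hdec := sorted_decomp xs pivot
  have hLlen : (PySem.List.sorted (xs.filter (fun x => decide (x < pivot))) (fun x => x) false).length
      = (xs.filter (fun x => decide (x < pivot))).length := PySem.List.length_sorted _ _ _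
  have hGlen : (PySem.List.sorted (xs.filter (fun x => decide (pivot < x))) (fun x => x) false).length
      = (xs.filter (fun x => decide (pivot < x))).length := PySem.List.length_sorted _ _ _
  have hsum : (xs.filter (fun x => decide (x < pivot))).length
      + (xs.count pivot + (xs.filter (fun x => decide (pivot < x))).length) = xs.length := by
    have := (perm3 xs pivot).length_eq
    simpa [List.filter_beq, List.length_replicate] using this
  by_cases h1 : k < (xs.filter (fun x => decide (x < pivot))).length
  · rw [if_pos h1]
    rw [kth_correct (xs.filter (fun x => decide (x < pivot))) k h1]
    rw [hdec, List.getD_append _ _ _ _ (by omega)]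
  · rw [if_neg h1]
    by_cases h2 : k < (xs.filter (fun x => decide (x < pivot))).length + xs.count pivot
    · rw [if_pos h2, hdec, List.getD_eq_getElem?_getD,
        List.getElem?_append_right (by omega),
        List.getElem?_append_left (by simp only [List.length_replicate]; omega)]
      simp only [List.getElem?_replicate]
      rw [if_pos (by omega)]
      rfl
    · rw [if_neg h2]
      rw [kth_correct (xs.filter (fun x => decide (pivot < x)))
        (k - ((xs.filter (fun x => decide (x < pivot))).length + xs.count pivot)) (by omega)]
      rw [hdec, List.getD_eq_getElem?_getD, List.getD_eq_getElem?_getD,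
        List.getElem?_append_right (by omega),
        List.getElem?_append_right (by simp only [List.length_replicate]; omega)]
      congr 2
      simp only [List.length_replicate]
      omega
termination_by xs.length
decreasing_by
  · exact pvFilterLt xs hxs _ (by simp)
  · exact pvFilterLt xs hxs _ (by simp)

-- A's append loop over the zip builds exactly filter-then-project
theorem foldl_pair (ps : List (Int × List Int)) (cut : Int) (a1 : List (List Int)) (a2 : List Int) :
    ps.foldl (fun (acc : List (List Int) × List Int) sc =>
        if sc.1 ≤ cut then (acc.1 ++ [sc.2], acc.2 ++ [sc.1]) else acc) (a1, a2)
      = (a1 ++ (ps.filter (fun sc => decide (sc.1 ≤ cut))).map Prod.snd,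
         a2 ++ (ps.filter (fun sc => decide (sc.1 ≤ cut))).map Prod.fst) := by
  induction ps generalizing a1 a2 with
  | nil => simp
  | cons q t ih =>
    by_cases h : q.1 ≤ cut
    · simp [h, ih]
    · simp [h, ih]

-- ===== VERDICT (by name: the statement is the Claim_ definition above) =====
theorem min_corpus_spec : Claim_equal_min_corpus := by
  intro c s _ hpre
  unfold Spec_min_corpus
  by_cases h : c.length < 100
  · simp [min_corpus, min_corpus_alt, h]
  · have hs : s ≠ [] := hpre.resolve_left h
    have hidx : s.length / 2 < s.length :=
      Nat.div_lt_self (List.length_pos_iff.mpr hs) one_lt_two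
    have hidx' : s.length / 2 < (PySem.List.sorted s (fun x => x) false).length := by
      rw [PySem.List.length_sorted]; exact hidx
    simp only [min_corpus, min_corpus_alt, if_neg h]
    rw [PySem.List.pyGet?_natCast, List.getElem?_eq_getElem hidx']
    dsimp only
    have hmed : kthSmallest s (s.length / 2)
        = (PySem.List.sorted s (fun x => x) false)[s.length / 2] := by
      rw [kth_correct s (s.length / 2) hidx, List.getD_eq_getElem _ _ hidx']
    rw [foldl_pair, hmed]
    simp
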